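-- pv_equiv track=rewrite | github.com/The-CheRocky-Project/CodeCommitMirror | python/src/layers/elaboration.py | check_for_goal
-- ===== SOURCE A (Python) =====
-- def check_for_goal(frames):
--     """Funzione che si occupa controllare se ci sono elementi corrispondenti
--         alla label 'goal'
--         "
--         Args:
--             frames: array di elementi
--
--         Returns:
--             Indice dell'ultimo elemento corrispondente alla label 'goal'
--             da rimuovere
--         """
--
--     find = False
--     counter = len(frames) - 1
--     while find == False and counter >= 0:
--         if frames[counter]['label'] == 2:
--             find = True
--         else:
--             counter = counter - 1
--     return counter
-- ===== SOURCE B (Python) =====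
-- def check_for_goal(frames):
--     stack = list(frames)
--     while stack:
--         if stack.pop()['label'] == 2:
--             return len(stack)
--     return -1
-- ===== Notes on version B (the rewrite author's own statement) =====
-- stated objective: alternative
-- what changed: Replaces the index-counter while-loop with a find flag by a consume-by-pop loop over a copy of the list: pop the last frame, return the remaining length on a label==2 hit, -1 when the stack empties (no counter arithmetic, no boolean flag).
import Mathlib
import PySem

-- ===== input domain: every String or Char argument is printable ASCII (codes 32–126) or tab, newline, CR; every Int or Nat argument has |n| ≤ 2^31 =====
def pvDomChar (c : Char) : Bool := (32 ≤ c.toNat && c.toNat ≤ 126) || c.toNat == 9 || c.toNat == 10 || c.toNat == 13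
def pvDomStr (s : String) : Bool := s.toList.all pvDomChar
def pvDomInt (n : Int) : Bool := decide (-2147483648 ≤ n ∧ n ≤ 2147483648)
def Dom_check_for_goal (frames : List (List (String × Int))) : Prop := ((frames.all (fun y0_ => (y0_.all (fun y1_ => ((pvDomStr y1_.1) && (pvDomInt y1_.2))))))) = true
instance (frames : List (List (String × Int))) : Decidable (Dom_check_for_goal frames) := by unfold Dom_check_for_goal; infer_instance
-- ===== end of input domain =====

-- B replaces A's index-counter while-loop with find flag by a consume-by-pop loop over a
-- copy of the list, returning the remaining length on a hit (objective: alternative;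
-- return-value equivalence only — neither version mutates its argument).

-- ===== PORT A =====
-- frames[counter]['label'] : dict lookup = first match in the association list;
-- a missing 'label' key is a KeyError in Python (the `none` branch, excluded by Pre_).
def cfgLoop (frames : List (List (String × Int))) (counter : Int) : Int :=
  if _h : 0 ≤ counter then
    match PySem.List.pyGet? frames counter with
    | some f =>
      match f.find? (fun p => p.1 == "label") with
      | some p => if p.2 = 2 then counter else cfgLoop frames (counter - 1)
      | none => counter   -- KeyError in Python: outside Pre_
    | none => counter     -- unreachable: 0 ≤ counter < len while looping
  else counter
termination_by (counter + 1).toNat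
decreasing_by omega

def check_for_goal (frames : List (List (String × Int))) : Int :=
  cfgLoop frames ((frames.length : Int) - 1)

-- ===== PORT B =====
-- 'while stack: … stack.pop() …' : pop removes the last element; len(stack) after the pop
-- is the popped element's index. A missing 'label' key is a KeyError (the inner `none`
-- branch, excluded by Pre_).
def cfgAltLoop (stack : List (List (String × Int))) : Int :=
  if hne : stack = [] then -1                   -- while-loop done: stack is empty
  else
    match (stack.getLast hne).find? (fun p => p.1 == "label") with
    | some p =>
      if p.2 = 2 then (stack.dropLast.length : Int) else cfgAltLoop stack.dropLast
    | none => -1                                -- KeyError in Python: outside Pre_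
termination_by stack.length
decreasing_by
  have := List.length_pos_iff.mpr hne
  simp [List.length_dropLast]; omega

def check_for_goal_alt (frames : List (List (String × Int))) : Int :=
  cfgAltLoop frames          -- stack = list(frames): a copy; the return value is the same

-- ===== PRECONDITION & SPEC =====
def hasLabelKey (f : List (String × Int)) : Bool := f.any (fun p => p.1 == "label")
def isGoalFrame (f : List (String × Int)) : Bool :=
  (f.find? (fun p => p.1 == "label")).map (·.2) == some 2

-- Pre_ excludes exactly the inputs on which A (and B alike) raises KeyError: those where
-- some frame without a 'label' key has no later frame whose label is 2 (the backward scan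
-- reaches it before stopping).
def Pre_check_for_goal (frames : List (List (String × Int))) : Prop :=
  ∀ i, (h : i < frames.length) →
    hasLabelKey frames[i] = true ∨ (frames.drop (i + 1)).any isGoalFrame = true
instance (frames : List (List (String × Int))) : Decidable (Pre_check_for_goal frames) := by
  unfold Pre_check_for_goal; infer_instance

def pvWitness_check_for_goal : (List (List (String × Int))) := [[("label", 2)], [("label", 0)]]

def Spec_check_for_goal (frames : List (List (String × Int))) (out : Int) : Prop := out = check_for_goal_alt frames
instance (frames : List (List (String × Int))) (out : Int) : Decidable (Spec_check_for_goal frames out) := by unfold Spec_check_for_goal; infer_instance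

-- ===== CLAIM (what is proved, stated in full; the proofs are below) =====
def Claim_equal_check_for_goal : Prop := ∀ (frames : List (List (String × Int))), Dom_check_for_goal frames → Pre_check_for_goal frames → Spec_check_for_goal frames (check_for_goal frames)

-- ===== LEMMAS AND PROOFS =====

-- A's loop ignores a trailing element once counter is below it.
theorem cfgLoop_append_lt (xs : List (List (String × Int))) (x : List (String × Int))
    (counter : Int) (h : counter < (xs.length : Int)) :
    cfgLoop (xs ++ [x]) counter = cfgLoop xs counter := by
  by_cases h0 : 0 ≤ counter
  · conv_lhs => rw [cfgLoop]
    conv_rhs => rw [cfgLoop]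
    have hg : PySem.List.pyGet? (xs ++ [x]) counter = PySem.List.pyGet? xs counter := by
      rw [PySem.List.pyGet?_of_nonneg _ h0, PySem.List.pyGet?_of_nonneg _ h0,
        List.getElem?_append_left (by omega : counter.toNat < xs.length)]
    simp only [h0, dif_pos, hg]
    cases hx : PySem.List.pyGet? xs counter with
    | none => rfl
    | some f =>
      cases hf : f.find? (fun p => p.1 == "label") with
      | none => simp only [hf]
      | some p =>
        simp only [hf]
        by_cases hp : p.2 = 2
        · rw [if_pos hp, if_pos hp]
        · rw [if_neg hp, if_neg hp]
          exact cfgLoop_append_lt xs x (counter - 1) (by omega)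
  · conv_lhs => rw [cfgLoop]
    conv_rhs => rw [cfgLoop]
    simp [h0]
termination_by (counter + 1).toNat
decreasing_by omega

-- One backward step of A at the last element.
theorem cfgLoop_append_last (xs : List (List (String × Int))) (x : List (String × Int)) :
    cfgLoop (xs ++ [x]) (xs.length : Int) =
      match x.find? (fun p => p.1 == "label") with
      | some p => if p.2 = 2 then (xs.length : Int) else cfgLoop xs ((xs.length : Int) - 1)
      | none => (xs.length : Int) := by
  conv_lhs => rw [cfgLoop]
  have h0 : (0 : Int) ≤ (xs.length : Int) := Int.natCast_nonneg _
  have hg : PySem.List.pyGet? (xs ++ [x]) (xs.length : Int) = some x :=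
    PySem.List.pyGet?_append_length xs [] x
  simp only [h0, dif_pos, hg]
  cases hf : x.find? (fun p => p.1 == "label") with
  | none => dsimp only
  | some p =>
    dsimp only
    by_cases hp : p.2 = 2
    · rw [if_pos hp, if_pos hp]
    · rw [if_neg hp, if_neg hp]
      exact cfgLoop_append_lt xs x ((xs.length : Int) - 1) (by omega)

-- One pop step of B at the last element.
theorem cfgAltLoop_append (xs : List (List (String × Int))) (x : List (String × Int)) :
    cfgAltLoop (xs ++ [x]) =
      match x.find? (fun p => p.1 == "label") with
      | some p => if p.2 = 2 then (xs.length : Int) else cfgAltLoop xs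
      | none => -1 := by
  rw [cfgAltLoop]
  have hne : xs ++ [x] ≠ [] := by simp
  rw [dif_neg hne, List.getLast_concat, List.dropLast_concat]

theorem main_equiv (frames : List (List (String × Int))) (hpre : Pre_check_for_goal frames) :
    check_for_goal frames = check_for_goal_alt frames := by
  induction frames using List.reverseRecOn with
  | nil =>
    unfold check_for_goal check_for_goal_alt
    rw [cfgLoop, cfgAltLoop]
    simp
  | append_singleton xs x ih =>
    -- Pre_ at the last index: the last frame must carry the 'label' key.
    have hx : hasLabelKey x = true := by
      have h' : xs.length < (xs ++ [x]).length := by simp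
      have := hpre xs.length h'
      rw [List.getElem_append_right (Nat.le_refl _)] at this
      simpa using this
    have hfind : (x.find? (fun p => p.1 == "label")).isSome :=
      List.find?_isSome.mpr (List.any_eq_true.mp hx)
    obtain ⟨p, hp⟩ := Option.isSome_iff_exists.mp hfind
    have hA : check_for_goal (xs ++ [x]) = cfgLoop (xs ++ [x]) (xs.length : Int) := by
      unfold check_for_goal
      congr 1
      simp only [List.length_append, List.length_cons, List.length_nil]
      push_cast
      omega
    rw [hA, cfgLoop_append_last, hp]
    unfold check_for_goal_alt
    rw [cfgAltLoop_append, hp]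
    dsimp only
    by_cases h2 : p.2 = 2
    · rw [if_pos h2, if_pos h2]
    · rw [if_neg h2, if_neg h2]
      -- Pre_ restricts to xs: x is not a goal frame, so every later-goal witness stays in xs.
      have hprexs : Pre_check_for_goal xs := by
        intro i h
        have h' : i < (xs ++ [x]).length := by simp; omega
        have := hpre i h'
        rw [List.getElem_append_left h,
          List.drop_append_of_le_length (by omega : i + 1 ≤ xs.length)] at this
        have hxg : isGoalFrame x = false := by simp [isGoalFrame, hp, h2]
        simpa [hxg] using this
      have hB := ih hprexs
      unfold check_for_goal check_for_goal_alt at hB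
      rw [← hB]

-- ===== VERDICT (by name: the statement is the Claim_ definition above) =====
theorem check_for_goal_spec : Claim_equal_check_for_goal := by
  intro frames _ hpre
  unfold Spec_check_for_goal
  exact main_equiv frames hpre
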